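-- pv_equiv track=rewrite | github.com/Jrgil20/Codeforces960 | cmadMadSum.py | encontrar_mad
-- ===== SOURCE A (Python) =====
-- def encontrar_mad(arreglo):
--     """
--     Encuentra el Máximo Duplicado Apareciendo (MAD) en el arreglo.
--     Si no existe tal número, devuelve 0.
--     """
--     frecuencia = {}
--     mad = 0
--     for num in arreglo:
--         if num in frecuencia:
--             frecuencia[num] += 1
--         else:
--             frecuencia[num] = 1
--         if frecuencia[num] > 1:
--             mad = max(mad, num)
--     return mad
-- ===== SOURCE B (Python) =====
-- def encontrar_mad(arreglo):
--     """
--     Encuentra el Maximo Duplicado Apareciendo (MAD) en el arreglo.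
--     Si no existe tal numero, devuelve 0.
--     """
--     s = sorted(arreglo, reverse=True)
--     for x, y in zip(s, s[1:]):
--         if x <= 0:
--             break  # remaining duplicates are <= 0, baseline 0 wins
--         if x == y:
--             return x
--     return 0
-- ===== Notes on version B (the rewrite author's own statement) =====
-- stated objective: alternative
-- what changed: B sorts the list in descending order and scans adjacent pairs, returning the first positive adjacent duplicate (the maximum duplicated value) and 0 otherwise, instead of A's single-pass frequency dictionary with a running max.
import Mathlib
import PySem

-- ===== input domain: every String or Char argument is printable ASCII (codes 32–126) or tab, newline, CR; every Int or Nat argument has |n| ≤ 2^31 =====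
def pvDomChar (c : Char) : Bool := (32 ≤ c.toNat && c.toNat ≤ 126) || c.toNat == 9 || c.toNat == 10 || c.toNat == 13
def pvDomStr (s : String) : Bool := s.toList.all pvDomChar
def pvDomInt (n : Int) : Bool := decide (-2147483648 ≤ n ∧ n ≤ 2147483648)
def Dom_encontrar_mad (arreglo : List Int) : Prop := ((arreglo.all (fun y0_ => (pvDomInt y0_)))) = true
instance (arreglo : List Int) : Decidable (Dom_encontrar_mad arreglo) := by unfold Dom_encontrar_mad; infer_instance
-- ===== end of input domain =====

-- B sorts descending and scans adjacent pairs for the first positive duplicate; A keeps a frequency dict and a running max in one pass.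

-- ===== PORT A =====
def encontrarLoop : List Int → PySem.Dict Int Int → Int → Int
  | [], _, mad => mad
  | num :: rest, frecuencia, mad =>
      let frecuencia' :=
        if frecuencia.contains num then frecuencia.modify num 0 (· + 1)
        else frecuencia.insert num 1
      let mad' := if 1 < frecuencia'.getD num 0 then max mad num else mad
      encontrarLoop rest frecuencia' mad'

def encontrar_mad (arreglo : List Int) : Int :=
  encontrarLoop arreglo PySem.Dict.empty 0

-- ===== PORT B =====
-- the 'for x, y in zip(s, s[1:])' loop with its break and early return
def scanAdj : List Int → Int
  | x :: y :: t => if x ≤ 0 then 0 else if x = y then x else scanAdj (y :: t)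
  | _ => 0

def encontrar_mad_alt (arreglo : List Int) : Int :=
  scanAdj (PySem.List.sorted arreglo (fun x => x) true)

-- ===== PRECONDITION & SPEC =====
def Spec_encontrar_mad (arreglo : List Int) (out : Int) : Prop := out = encontrar_mad_alt arreglo
instance (arreglo : List Int) (out : Int) : Decidable (Spec_encontrar_mad arreglo out) := by unfold Spec_encontrar_mad; infer_instance

-- ===== CLAIM (what is proved, stated in full; the proofs are below) =====
def Claim_equal_encontrar_mad : Prop := ∀ (arreglo : List Int), Dom_encontrar_mad arreglo → Spec_encontrar_mad arreglo (encontrar_mad arreglo)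

-- ===== LEMMAS AND PROOFS =====

-- A's loop with the dict state abstracted into a count function.
def madAux (c : Int → Int) : List Int → Int → Int
  | [], mad => mad
  | num :: rest, mad =>
      madAux (fun v => if v = num then c v + 1 else c v) rest
        (if 1 < c num + 1 then max mad num else mad)

lemma encontrarLoop_eq_madAux (l : List Int) :
    ∀ (frec : PySem.Dict Int Int) (mad : Int),
      encontrarLoop l frec mad = madAux (fun v => frec.getD v 0) l mad := by
  induction l with
  | nil => intro frec mad; rfl
  | cons num rest ih =>
      intro frec mad
      simp only [encontrarLoop, madAux]
      cases hc : frec.contains num with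
      | true =>
          rw [if_pos rfl, ih]
          have h1 : (frec.modify num 0 (· + 1)).getD num 0 = frec.getD num 0 + 1 :=
            PySem.Dict.getD_modify_self ..
          have h2 : (fun v => (frec.modify num 0 (· + 1)).getD v 0)
              = fun v => if v = num then frec.getD v 0 + 1 else frec.getD v 0 := by
            funext v
            rw [PySem.Dict.getD_modify]
            split_ifs with h
            · subst h; rfl
            · rfl
          simp only [h2, h1]
      | false =>
          rw [if_neg (by simp), ih]
          have h0 : frec.getD num 0 = 0 := PySem.Dict.getD_of_not_contains frec 0 hc
          have h1 : (frec.insert num 1).getD num 0 = 1 := by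
            rw [PySem.Dict.getD_insert]; simp
          have h2 : (fun v => (frec.insert num 1).getD v 0)
              = fun v => if v = num then frec.getD v 0 + 1 else frec.getD v 0 := by
            funext v
            rw [PySem.Dict.getD_insert]
            split_ifs with h
            · subst h; rw [h0]; norm_num
            · rfl
          simp only [h2, h1, h0]; norm_num

-- upper-bound characterization of A's running max: a value bounds madAux iff it bounds
-- mad and every element that is already seen (c v ≥ 1) or occurs at least twice in l.
lemma madAux_le_iff (l : List Int) :
    ∀ (c : Int → Int) (mad b : Int), (∀ v, 0 ≤ c v) →
      (madAux c l mad ≤ b ↔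
        mad ≤ b ∧ ∀ v ∈ l, (1 ≤ c v ∨ 2 ≤ l.count v) → v ≤ b) := by
  induction l with
  | nil => intro c mad b _; simp [madAux]
  | cons num rest ih =>
      intro c mad b hc
      have hc' : ∀ v, 0 ≤ (if v = num then c v + 1 else c v) := by
        intro v; have := hc v; split_ifs <;> omega
      rw [madAux, ih _ _ _ hc']
      constructor
      · rintro ⟨hmad, hall⟩
        have hmad' : mad ≤ b := by
          by_cases h : 1 < c num + 1
          · rw [if_pos h] at hmad; exact le_trans (le_max_left _ _) hmad
          · rwa [if_neg h] at hmad
        refine ⟨hmad', ?_⟩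
        intro v hv hcond
        rcases List.mem_cons.mp hv with rfl | hvr
        · by_cases h : 1 < c v + 1
          · rw [if_pos h] at hmad; exact le_trans (le_max_right _ _) hmad
          · have hc0 : c v = 0 := le_antisymm (by omega) (hc v)
            have hmem : v ∈ rest := by
              rcases hcond with h1 | h2
              · omega
              · have hcs : (v :: rest).count v = rest.count v + 1 := List.count_cons_self
                exact List.count_pos_iff.mp (by omega)
            exact hall v hmem (Or.inl (by simp [hc0]))
        · apply hall v hvr
          rcases hcond with h1 | h2
          · have := hc v; left; split_ifs <;> omega
          · by_cases hv : v = num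
            · left; rw [if_pos hv]; have := hc v; omega
            · right
              have hcc : (num :: rest).count v = rest.count v :=
                List.count_cons_of_ne (fun h => hv h.symm)
              omega
      · rintro ⟨hmad, hall⟩
        constructor
        · by_cases h : 1 < c num + 1
          · rw [if_pos h, max_le_iff]
            exact ⟨hmad, hall num (List.mem_cons_self ..) (Or.inl (by omega))⟩
          · rwa [if_neg h]
        · intro v hvr hcond
          apply hall v (List.mem_cons_of_mem _ hvr)
          rcases hcond with h1 | h2
          · by_cases hv : v = num
            · subst hv
              right
              have hcs : (v :: rest).count v = rest.count v + 1 := List.count_cons_self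
              have : 1 ≤ rest.count v := List.count_pos_iff.mpr hvr
              omega
            · rw [if_neg hv] at h1; exact Or.inl h1
          · right
            by_cases hv : v = num
            · subst hv
              have hcs : (v :: rest).count v = rest.count v + 1 := List.count_cons_self
              omega
            · have hcc : (num :: rest).count v = rest.count v :=
                List.count_cons_of_ne (fun h => hv h.symm)
              omega

-- B's upper-bound characterization on a descending-sorted list.
lemma scanAdj_le_iff (s : List Int) (hs : s.Pairwise (fun a b => b ≤ a)) (b : Int) :
    scanAdj s ≤ b ↔ 0 ≤ b ∧ ∀ v, 2 ≤ s.count v → v ≤ b := by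
  induction s with
  | nil => simp [scanAdj]
  | cons x s' ih =>
      cases s' with
      | nil =>
          simp only [scanAdj]
          constructor
          · intro hb
            refine ⟨hb, fun v hv => absurd hv ?_⟩
            have : List.count v [x] ≤ 1 := by
              have := List.count_le_length (a := v) (l := [x]); simpa using this
            omega
          · exact fun h => h.1
      | cons y t =>
          obtain ⟨hx, hyt⟩ := List.pairwise_cons.mp hs
          have hxy : y ≤ x := hx y (List.mem_cons_self ..)
          have hxt : ∀ z ∈ t, z ≤ x := fun z hz => hx z (List.mem_cons_of_mem _ hz)
          have ih' := ih hyt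
          simp only [scanAdj]
          by_cases hx0 : x ≤ 0
          · rw [if_pos hx0]
            constructor
            · intro hb
              refine ⟨hb, fun v hv => ?_⟩
              have hvm : v ∈ x :: y :: t := List.count_pos_iff.mp (by omega)
              have hvx : v ≤ x := by
                rcases List.mem_cons.mp hvm with rfl | hvm'
                · exact le_refl _
                · exact hx v hvm'
              omega
            · exact fun h => h.1
          · rw [if_neg hx0]
            by_cases hxyeq : x = y
            · rw [if_pos hxyeq]
              constructor
              · intro hb
                refine ⟨by omega, fun v hv => ?_⟩
                have hvm : v ∈ x :: y :: t := List.count_pos_iff.mp (by omega)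
                rcases List.mem_cons.mp hvm with rfl | hvm'
                · exact hb
                · exact le_trans (hx v hvm') hb
              · intro ⟨_, hall⟩
                apply hall x
                subst hxyeq
                have : (x :: x :: t).count x = (x :: t).count x + 1 := List.count_cons_self
                have : (x :: t).count x = t.count x + 1 := List.count_cons_self
                omega
            · rw [if_neg hxyeq, ih']
              have hylt : y < x := lt_of_le_of_ne hxy (fun e => hxyeq e.symm)
              have hxnot : x ∉ y :: t := by
                intro hmem
                rcases List.mem_cons.mp hmem with rfl | hmem'
                · exact hxyeq rfl
                · have : x ≤ y := (List.pairwise_cons.mp hyt).1 x hmem'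
                  omega
              constructor
              · rintro ⟨hb, hall⟩
                refine ⟨hb, fun v hv => ?_⟩
                by_cases hvx : v = x
                · subst hvx
                  have h0 : (y :: t).count v = 0 := List.count_eq_zero.mpr hxnot
                  have : (v :: y :: t).count v = (y :: t).count v + 1 := List.count_cons_self
                  omega
                · have : (x :: y :: t).count v = (y :: t).count v :=
                    List.count_cons_of_ne (fun h => hvx h.symm)
                  exact hall v (by omega)
              · rintro ⟨hb, hall⟩
                refine ⟨hb, fun v hv => ?_⟩
                by_cases hvx : v = x
                · subst hvx
                  exact absurd (List.count_pos_iff.mp (by omega)) hxnot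
                · apply hall v
                  have : (x :: y :: t).count v = (y :: t).count v :=
                    List.count_cons_of_ne (fun h => hvx h.symm)
                  omega

lemma alt_le_iff (arreglo : List Int) (b : Int) :
    encontrar_mad_alt arreglo ≤ b ↔ 0 ≤ b ∧ ∀ v ∈ arreglo, 2 ≤ arreglo.count v → v ≤ b := by
  unfold encontrar_mad_alt
  have hperm : (PySem.List.sorted arreglo (fun x => x) true).Perm arreglo :=
    PySem.List.sorted_perm ..
  rw [scanAdj_le_iff _ (PySem.List.sorted_pairwise_rev ..)]
  constructor
  · rintro ⟨hb, hall⟩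
    exact ⟨hb, fun v _ hv => hall v (by rw [hperm.count_eq]; exact hv)⟩
  · rintro ⟨hb, hall⟩
    refine ⟨hb, fun v hv => ?_⟩
    rw [hperm.count_eq] at hv
    exact hall v (List.count_pos_iff.mp (by omega)) hv

-- ===== VERDICT (by name: the statement is the Claim_ definition above) =====
theorem encontrar_mad_spec : Claim_equal_encontrar_mad := by
  intro arreglo _
  unfold Spec_encontrar_mad
  have hA : ∀ b, encontrar_mad arreglo ≤ b ↔
      0 ≤ b ∧ ∀ v ∈ arreglo, 2 ≤ arreglo.count v → v ≤ b := by
    intro b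
    unfold encontrar_mad
    rw [encontrarLoop_eq_madAux,
      madAux_le_iff _ _ _ _ (by intro v; simp [PySem.Dict.getD_empty])]
    simp [PySem.Dict.getD_empty]
  exact le_antisymm
    ((hA _).mpr ((alt_le_iff ..).mp le_rfl))
    ((alt_le_iff ..).mpr ((hA _).mp le_rfl))
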